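-- pv_equiv track=rewrite | github.com/unicamp-dl/Lissard | src/repeat_copy_logic/english.py | x_administrative_district
-- ===== SOURCE A (Python) =====
-- def x_administrative_district(times):
--     '''
--     repeat the phrase the administrative district three times, and say the phrase hello world after the second time
--     '''
--     out = ''
--     count = 0
--     for x in range(0, times+1):
--         if count == 2:
--             out+='hello world '
--         else:
--             out+='the administrative district '
--         count+=1
--     return out.strip()
-- ===== SOURCE B (Python) =====
-- def x_administrative_district(times):
--     n = times + 1
--     phrase = 'the administrative district '
--     if n >= 3:
--         return (phrase * 2 + 'hello world ' + phrase * (n - 3)).strip()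
--     return (phrase * n).strip()
-- ===== Notes on version B (the rewrite author's own statement) =====
-- stated objective: simpler
-- what changed: Replaces the per-iteration loop with counter by a closed-form string construction: string multiplication for the repeated phrase with the single 'hello world ' spliced in at index 2.
import Mathlib
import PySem

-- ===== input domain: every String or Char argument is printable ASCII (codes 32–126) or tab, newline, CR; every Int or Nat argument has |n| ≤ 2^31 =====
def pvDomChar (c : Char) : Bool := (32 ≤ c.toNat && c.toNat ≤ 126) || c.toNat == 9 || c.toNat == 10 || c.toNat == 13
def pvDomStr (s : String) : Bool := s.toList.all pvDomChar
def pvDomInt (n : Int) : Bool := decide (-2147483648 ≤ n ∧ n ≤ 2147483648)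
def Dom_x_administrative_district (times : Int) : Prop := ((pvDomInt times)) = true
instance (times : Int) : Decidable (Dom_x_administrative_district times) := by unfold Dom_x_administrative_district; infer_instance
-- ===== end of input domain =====

-- B replaces A's per-iteration concatenation loop by a closed-form string construction
-- (phrase*2 + 'hello world ' + phrase*(n-3), stripped); objective: simpler.


-- ===== PORT A =====
def x_administrative_district (times : Int) : String :=
  let res := (PySem.List.pyRange 0 (times + 1) 1).foldl
    (fun (st : String × Int) _x =>
      let out := if st.2 == 2 then st.1 ++ "hello world " else st.1 ++ "the administrative district "
      (out, st.2 + 1))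
    ("", (0 : Int))
  PySem.Str.strip res.1

-- ===== PORT B =====
-- hand port of Python's string repetition 's * k' (exact: empty for k ≤ 0)
def pyStrTimesGo (s : String) : Nat → String
  | 0 => ""
  | m + 1 => s ++ pyStrTimesGo s m

def pyStrTimes (s : String) (k : Int) : String := pyStrTimesGo s k.toNat

def x_administrative_district_alt (times : Int) : String :=
  let n := times + 1
  let phrase := "the administrative district "
  if n ≥ 3 then
    PySem.Str.strip (pyStrTimes phrase 2 ++ "hello world " ++ pyStrTimes phrase (n - 3))
  else
    PySem.Str.strip (pyStrTimes phrase n)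

-- ===== PRECONDITION & SPEC =====
def Spec_x_administrative_district (times : Int) (out : String) : Prop := out = x_administrative_district_alt times
instance (times : Int) (out : String) : Decidable (Spec_x_administrative_district times out) := by unfold Spec_x_administrative_district; infer_instance

-- ===== CLAIM (what is proved, stated in full; the proofs are below) =====
def Claim_equal_x_administrative_district : Prop := ∀ (times : Int), Dom_x_administrative_district times → Spec_x_administrative_district times (x_administrative_district times)

-- ===== LEMMAS AND PROOFS =====

-- canonical form of A's loop body output, indexed by the starting counter and iteration count
def xadG : Int → Nat → String
  | _, 0 => ""
  | c, m + 1 => (if c == 2 then "hello world " else "the administrative district ") ++ xadG (c + 1) m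

theorem xad_foldl (l : List Int) (s : String) (c : Int) :
    l.foldl (fun (st : String × Int) _x =>
      ((if st.2 == 2 then st.1 ++ "hello world " else st.1 ++ "the administrative district "), st.2 + 1))
      (s, c) = (s ++ xadG c l.length, c + l.length) := by
  induction l generalizing s c with
  | nil => simp [xadG]
  | cons a t ih =>
    simp only [List.foldl_cons, List.length_cons, ih, xadG]
    simp only [Prod.mk.injEq]
    refine ⟨?_, by push_cast; omega⟩
    by_cases h : c == 2 <;> simp [h, String.append_assoc]

theorem xadG_high (k : Nat) (c : Int) (h : 3 ≤ c) : xadG c k = pyStrTimesGo "the administrative district " k := by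
  induction k generalizing c with
  | zero => rfl
  | succ m ih =>
    have hc : (c == 2) = false := by simp; omega
    simp [xadG, pyStrTimesGo, hc, ih (c + 1) (by omega)]

-- ===== VERDICT =====
theorem x_administrative_district_spec : Claim_equal_x_administrative_district := by
  intro times _
  unfold Spec_x_administrative_district x_administrative_district x_administrative_district_alt
  simp only []
  rw [xad_foldl]
  simp only [PySem.List.length_pyRange_one]
  set n := times + 1 with hn
  by_cases h3 : n ≥ 3
  · have hsplit : (n - 0).toNat = 3 + (n - 3).toNat := by omega
    rw [if_pos h3, hsplit]
    have hx : 3 + (n - 3).toNat = (n - 3).toNat + 1 + 1 + 1 := by omega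
    have hA : xadG 0 (3 + (n - 3).toNat) =
        "the administrative district " ++ ("the administrative district " ++ ("hello world " ++
          pyStrTimesGo "the administrative district " (n - 3).toNat)) := by
      rw [hx]
      simp [xadG, xadG_high ((n - 3).toNat) 3 (by omega)]
    rw [hA]
    congr 1
  · rw [if_neg h3]
    have hle : (n - 0).toNat = n.toNat := by omega
    rw [hle]
    have hub : n.toNat ≤ 2 := by omega
    interval_cases hcase : n.toNat <;> simp [hcase, pyStrTimes, pyStrTimesGo, xadG]
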